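-- pv_equiv track=rewrite | github.com/CSU-ZY/CSUPDK | pp/name.py | clean_name
-- ===== SOURCE A (Python) =====
-- def clean_name(name: str) -> str:
--     """Ensures that gds cells are composed of [a-zA-Z0-9]
--
--     FIXME: only a few characters are currently replaced.
--         This function has been updated only on case-by-case basis
--     """
--     replace_map = {
--         " ": "_",
--         "!": "_",
--         "#": "_",
--         "%": "_",
--         "(": "",
--         ")": "",
--         "*": "_",
--         ",": "_",
--         "-": "m",
--         ".": "p",
--         "/": "_",
--         ":": "_",
--         "=": "",
--         "@": "_",
--         "[": "",
--         "]": "",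
--     }
--     for k, v in list(replace_map.items()):
--         name = name.replace(k, v)
--     return name
-- ===== SOURCE B (Python) =====
-- def clean_name(name: str) -> str:
--     """Ensures that gds cells are composed of [a-zA-Z0-9]
--
--     Single pass over the characters with an accumulator: delete the
--     bracket/equals characters, map '-'->'m', '.'->'p', the other unsafe
--     punctuation to '_', and keep everything else.  No dict, no repeated
--     whole-string scans.
--     """
--     out = []
--     for c in name:
--         if c in "()=[]":
--             continue
--         if c == "-":
--             out.append("m")
--         elif c == ".":
--             out.append("p")
--         elif c in " !#%*,/:@":
--             out.append("_")
--         else: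
--             out.append(c)
--     return "".join(out)
-- ===== Notes on version B (the rewrite author's own statement) =====
-- stated objective: idiomatic
-- what changed: B drops the dict and the 16 whole-string replace passes entirely: one loop over the characters with an accumulator, classifying each character by an if/elif chain (delete, 'm', 'p', '_', or keep).
import Mathlib
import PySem

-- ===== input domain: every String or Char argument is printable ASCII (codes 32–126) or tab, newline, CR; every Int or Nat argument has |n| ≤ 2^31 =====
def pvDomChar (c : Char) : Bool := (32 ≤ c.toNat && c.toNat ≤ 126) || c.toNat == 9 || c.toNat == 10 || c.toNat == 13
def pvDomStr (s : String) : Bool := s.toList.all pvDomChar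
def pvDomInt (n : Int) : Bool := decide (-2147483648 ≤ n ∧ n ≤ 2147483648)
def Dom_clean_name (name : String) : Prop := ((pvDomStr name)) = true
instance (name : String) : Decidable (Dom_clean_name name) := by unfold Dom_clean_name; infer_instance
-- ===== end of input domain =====

-- B drops the dict and the 16 whole-string replace passes: one loop over the
-- characters with an accumulator and an if/elif chain (idiomatic; same result).

-- ===== PORT A =====
-- the dict literal of A, in insertion order
def cleanNameMapA : List (String × String) :=
  [(" ", "_"), ("!", "_"), ("#", "_"), ("%", "_"), ("(", ""), (")", ""),
   ("*", "_"), (",", "_"), ("-", "m"), (".", "p"), ("/", "_"), (":", "_"),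
   ("=", ""), ("@", "_"), ("[", ""), ("]", "")]

def clean_name (name : String) : String :=
  cleanNameMapA.foldl (fun n kv => PySem.Str.replace n kv.1 kv.2) name

-- ===== PORT B =====
-- one loop iteration of B: classify the character, append to the accumulator
def pvAltStep (acc : List String) (c : Char) : List String :=
  if ("()=[]" : String).toList.contains c then acc
  else if c = '-' then acc ++ ["m"]
  else if c = '.' then acc ++ ["p"]
  else if (" !#%*,/:@" : String).toList.contains c then acc ++ ["_"]
  else acc ++ [String.ofList [c]]

def clean_name_alt (name : String) : String :=
  PySem.Str.join "" (name.toList.foldl pvAltStep [])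

-- ===== PRECONDITION & SPEC =====
def Spec_clean_name (name : String) (out : String) : Prop := out = clean_name_alt name
instance (name : String) (out : String) : Decidable (Spec_clean_name name out) := by unfold Spec_clean_name; infer_instance

-- ===== CLAIM (what is proved, stated in full; the proofs are below) =====
def Claim_equal_clean_name : Prop := ∀ (name : String), Dom_clean_name name → Spec_clean_name name (clean_name name)

-- ===== LEMMAS AND PROOFS =====

-- per-entry character substitution
def pvSub (k : Char) (v : List Char) (c : Char) : List Char := if c = k then v else [c]

-- char-level pairs of A's map
def pvPairsC : List (Char × List Char) :=
  [(' ', ['_']), ('!', ['_']), ('#', ['_']), ('%', ['_']), ('(', []), (')', []),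
   ('*', ['_']), (',', ['_']), ('-', ['m']), ('.', ['p']), ('/', ['_']), (':', ['_']),
   ('=', []), ('@', ['_']), ('[', []), (']', [])]

def pvChain (ps : List (Char × List Char)) (l : List Char) : List Char :=
  ps.foldl (fun s kv => s.flatMap (pvSub kv.1 kv.2)) l

-- B's per-character contribution, as a list of strings (empty = deleted)
def pvH (c : Char) : List String :=
  if ("()=[]" : String).toList.contains c then []
  else if c = '-' then ["m"]
  else if c = '.' then ["p"]
  else if (" !#%*,/:@" : String).toList.contains c then ["_"]
  else [String.ofList [c]]

-- same, at the char level
def pvF (c : Char) : List Char := (pvH c).flatMap String.toList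

theorem pvGoSingle (k : Char) (v : List Char) :
    ∀ (fuel : Nat) (l acc : List Char), l.length ≤ fuel →
      PySem.Chars.replace.go [k] v fuel l acc = acc.reverse ++ l.flatMap (pvSub k v) := by
  intro fuel
  induction fuel with
  | zero =>
    intro l acc h
    have : l = [] := List.eq_nil_of_length_eq_zero (Nat.le_zero.mp h)
    subst this
    simp [PySem.Chars.replace.go]
  | succ n ih =>
    intro l acc h
    cases l with
    | nil => simp [PySem.Chars.replace.go]
    | cons c t =>
      simp only [PySem.Chars.replace.go]
      by_cases hc : c = k
      · subst hc
        have hp : List.isPrefixOf [c] (c :: t) = true := by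
          simp [List.isPrefixOf]
        rw [if_pos hp]
        rw [ih _ _ (by simpa using Nat.le_of_succ_le_succ h)]
        simp [pvSub]
      · have hp : List.isPrefixOf [k] (c :: t) = false := by
          simp [List.isPrefixOf]
          intro h'; exact absurd h'.symm hc
        rw [if_neg (by simp [hp])]
        rw [ih _ _ (by simpa using Nat.le_of_succ_le_succ h)]
        simp [pvSub, hc]

theorem pvReplaceSingle (l : List Char) (k : Char) (v : List Char) :
    PySem.Chars.replace l [k] v = l.flatMap (pvSub k v) := by
  have h : ([k] : List Char).isEmpty = false := rfl
  rw [PySem.Chars.replace, h]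
  simp only [Bool.false_eq_true, if_false]
  exact pvGoSingle k v l.length l [] le_rfl

theorem pvChainAppend (ps : List (Char × List Char)) :
    ∀ x y : List Char, pvChain ps (x ++ y) = pvChain ps x ++ pvChain ps y := by
  induction ps with
  | nil => intro x y; simp [pvChain]
  | cons p ps ih =>
    intro x y
    simp only [pvChain, List.foldl_cons] at *
    rw [List.flatMap_append]
    exact ih _ _

theorem pvChainSingle (c : Char) : pvChain pvPairsC [c] = pvF c := by
  by_cases h1 : c = ' '; · subst h1; decide
  by_cases h2 : c = '!'; · subst h2; decide
  by_cases h3 : c = '#'; · subst h3; decide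
  by_cases h4 : c = '%'; · subst h4; decide
  by_cases h5 : c = '('; · subst h5; decide
  by_cases h6 : c = ')'; · subst h6; decide
  by_cases h7 : c = '*'; · subst h7; decide
  by_cases h8 : c = ','; · subst h8; decide
  by_cases h9 : c = '-'; · subst h9; decide
  by_cases h10 : c = '.'; · subst h10; decide
  by_cases h11 : c = '/'; · subst h11; decide
  by_cases h12 : c = ':'; · subst h12; decide
  by_cases h13 : c = '='; · subst h13; decide
  by_cases h14 : c = '@'; · subst h14; decide
  by_cases h15 : c = '['; · subst h15; decide
  by_cases h16 : c = ']'; · subst h16; decide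
  simp [pvChain, pvPairsC, pvSub, pvF, pvH,
        h1, h2, h3, h4, h5, h6, h7, h8, h9, h10, h11, h12, h13, h14, h15, h16]

theorem pvChainEqFlatMap (l : List Char) : pvChain pvPairsC l = l.flatMap pvF := by
  induction l with
  | nil => decide
  | cons c t ih =>
    have : (c :: t) = [c] ++ t := rfl
    rw [this, pvChainAppend, ih, pvChainSingle]
    simp

theorem pvAChain (name : String) : (clean_name name).toList = pvChain pvPairsC name.toList := by
  have t1 : (" " : String).toList = [' '] := rfl
  have t2 : ("!" : String).toList = ['!'] := rfl
  have t3 : ("#" : String).toList = ['#'] := rfl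
  have t4 : ("%" : String).toList = ['%'] := rfl
  have t5 : ("(" : String).toList = ['('] := rfl
  have t6 : (")" : String).toList = [')'] := rfl
  have t7 : ("*" : String).toList = ['*'] := rfl
  have t8 : ("," : String).toList = [','] := rfl
  have t9 : ("-" : String).toList = ['-'] := rfl
  have t10 : ("." : String).toList = ['.'] := rfl
  have t11 : ("/" : String).toList = ['/'] := rfl
  have t12 : (":" : String).toList = [':'] := rfl
  have t13 : ("=" : String).toList = ['='] := rfl
  have t14 : ("@" : String).toList = ['@'] := rfl
  have t15 : ("[" : String).toList = ['['] := rfl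
  have t16 : ("]" : String).toList = [']'] := rfl
  have v1 : ("_" : String).toList = ['_'] := rfl
  have v2 : ("m" : String).toList = ['m'] := rfl
  have v3 : ("p" : String).toList = ['p'] := rfl
  have v4 : ("" : String).toList = [] := rfl
  simp only [clean_name, cleanNameMapA, List.foldl_cons, List.foldl_nil,
    PySem.Str.toList_replace, t1, t2, t3, t4, t5, t6, t7, t8, t9, t10, t11, t12,
    t13, t14, t15, t16, v1, v2, v3, v4, pvReplaceSingle]
  simp only [pvChain, pvPairsC, List.foldl_cons, List.foldl_nil]

-- B's loop accumulates exactly the flatMap of the per-character contributions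
theorem pvFoldStep : ∀ (l : List Char) (acc : List String),
    l.foldl pvAltStep acc = acc ++ l.flatMap pvH := by
  intro l
  induction l with
  | nil => intro acc; simp
  | cons c t ih =>
    intro acc
    simp only [List.foldl_cons, List.flatMap_cons, ih]
    have : pvAltStep acc c = acc ++ pvH c := by
      unfold pvAltStep pvH
      split_ifs <;> simp
    rw [this, List.append_assoc]

theorem pvBJoin (name : String) : (clean_name_alt name).toList = name.toList.flatMap pvF := by
  simp only [clean_name_alt, pvFoldStep, List.nil_append, PySem.Str.toList_join]
  have hjoin : PySem.Chars.join "".toList = List.flatten := by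
    funext parts
    simp [PySem.Chars.join, List.intercalate]
    induction parts with
    | nil => rfl
    | cons p ps ih => cases ps <;> simp_all [List.intersperse]
  rw [hjoin]
  induction name.toList with
  | nil => rfl
  | cons c t ih =>
    simp only [List.flatMap_cons, List.map_append, List.flatten_append, ih, pvF]
    congr 1

-- ===== VERDICT (by name: the statement is the Claim_ definition above) =====
theorem clean_name_spec : Claim_equal_clean_name := by
  intro name _
  unfold Spec_clean_name
  have h : (clean_name name).toList = (clean_name_alt name).toList := by
    rw [pvAChain, pvBJoin, pvChainEqFlatMap]
  exact String.toList_injective h
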